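-- pv_equiv track=rewrite | github.com/unior-nlp-research-group/Ghigliottina | code/resources.py | extractCompundsInLexicon
-- ===== SOURCE A (Python) =====
-- def extractCompundsInLexicon(lexicon_set):
--     from collections import defaultdict
--     dict = defaultdict(list)
--     compounds_dict = defaultdict(list) # radio -> [attività attivo], contro -> figura
--     for w in lexicon_set:
--         for i in range(1, len(w)):
--             first, second = w[:i], w[i:]
--             if first in lexicon_set and second in lexicon_set:
--                 compounds_dict[first].append(second)
--     return compounds_dict
-- ===== SOURCE B (Python) =====
-- def extractCompundsInLexicon(lexicon_set):
--     # Build a trie of the lexicon once; walk each word through the trie so every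
--     # prefix-membership test is a single step, checking the suffix only at word-ends.
--     root = {}
--     for w in lexicon_set:
--         node = root
--         for ch in w:
--             node = node.setdefault(ch, {})
--         if w:
--             node[None] = True
--     members = set(lexicon_set)
--     compounds = {}
--     for w in lexicon_set:
--         node = root
--         prefix = ""
--         rest = w
--         while rest:
--             ch, rest = rest[0], rest[1:]
--             nxt = node.get(ch)
--             if nxt is None:
--                 break
--             prefix = prefix + ch
--             if None in nxt and rest and rest in members:
--                 compounds.setdefault(prefix, []).append(rest)
--             node = nxt
--     return compounds
-- ===== Notes on version B (the rewrite author's own statement) =====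
-- stated objective: alternative
-- what changed: Replaces the per-split linear list-membership scans with a trie of the lexicon walked once per word (prefix hits read off trie terminals) plus a hash set consulted only for the suffix at those hits.
import Mathlib
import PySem

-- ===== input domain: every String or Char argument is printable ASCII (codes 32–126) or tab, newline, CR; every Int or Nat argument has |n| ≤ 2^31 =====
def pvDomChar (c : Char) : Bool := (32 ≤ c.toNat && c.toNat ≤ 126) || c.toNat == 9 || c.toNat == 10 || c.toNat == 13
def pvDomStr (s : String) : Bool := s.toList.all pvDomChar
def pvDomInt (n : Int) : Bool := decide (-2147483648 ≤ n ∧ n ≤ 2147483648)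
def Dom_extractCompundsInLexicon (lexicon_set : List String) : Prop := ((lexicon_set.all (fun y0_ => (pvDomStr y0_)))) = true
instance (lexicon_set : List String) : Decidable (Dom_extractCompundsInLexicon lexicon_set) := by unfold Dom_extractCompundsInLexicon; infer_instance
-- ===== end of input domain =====

-- B replaces A's per-split linear scans of the lexicon list with a trie of the lexicon
-- walked once per word (prefix hits are trie terminals) plus a set lookup for the suffix
-- at those hits only (objective: alternative algorithm, same measured cost).

-- ===== PORT A =====
-- literal port of A: for each w, for i in range(1, len(w)), test both slices by list membership,
-- compounds_dict[first].append(second) on a defaultdict(list) = Dict.modify with default [].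
def extractCompundsInLexicon (lexicon_set : List String) : List (String × List String) :=
  (lexicon_set.foldl (fun d w =>
    (PySem.List.pyRange 1 (PySem.Str.len w) 1).foldl (fun d i =>
      let first := PySem.Str.slice w none (some i)
      let second := PySem.Str.slice w (some i) none
      if lexicon_set.contains first && lexicon_set.contains second then
        d.modify first [] (· ++ [second])
      else d) d) (PySem.Dict.empty)).items

-- ===== PORT B =====
-- B's Python trie is a nested dict {char: child, None: True}; ported as a first-child /
-- next-sibling inductive: a `node c term child next` is the entry for `c` in a children dict
-- (term = the None marker), `next` the rest of that dict in insertion order — exact for the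
-- get/setdefault accesses B performs.
inductive PTrie where
  | nil : PTrie
  | node : Char → Bool → PTrie → PTrie → PTrie
deriving DecidableEq, Repr

-- node = node.setdefault(ch, {}) along w, then node[None] = True (skipped for empty w)
def PTrie.insert : PTrie → List Char → PTrie
  | t, [] => t
  | .nil, c :: cs => .node c cs.isEmpty (PTrie.insert .nil cs) .nil
  | .node c' tm ch nx, c :: cs =>
      if c = c' then .node c' (tm || cs.isEmpty) (PTrie.insert ch cs) nx
      else .node c' tm ch (PTrie.insert nx (c :: cs))
termination_by t cs => (sizeOf t, cs.length)

-- node.get(ch): the (None-marker, children) pair of the child for ch, if present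
def PTrie.findSib : PTrie → Char → Option (Bool × PTrie)
  | .nil, _ => none
  | .node c' tm ch nx, c => if c = c' then some (tm, ch) else PTrie.findSib nx c

-- the `while rest:` loop of B for one word: pre/rest are B's prefix/rest accumulators
def pvWalk (members : PySem.Set String) : PTrie → List Char → List Char → PySem.Dict String (List String) → PySem.Dict String (List String)
  | _, _, [], d => d
  | cur, pre, c :: rs, d =>
    match PTrie.findSib cur c with
    | none => d
    | some (tm, ch) =>
      let pre' := pre ++ [c]
      let d' := if tm && !rs.isEmpty && members.contains (String.ofList rs) then
                  d.modify (String.ofList pre') [] (· ++ [String.ofList rs])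
                else d
      pvWalk members ch pre' rs d'

def extractCompundsInLexicon_alt (lexicon_set : List String) : List (String × List String) :=
  let root := lexicon_set.foldl (fun t w => PTrie.insert t w.toList) .nil
  let members := PySem.Set.ofList lexicon_set
  (lexicon_set.foldl (fun d w => pvWalk members root [] w.toList d) PySem.Dict.empty).items

-- ===== PRECONDITION & SPEC =====
def Spec_extractCompundsInLexicon (lexicon_set : List String) (out : List (String × List String)) : Prop := out = extractCompundsInLexicon_alt lexicon_set
instance (lexicon_set : List String) (out : List (String × List String)) : Decidable (Spec_extractCompundsInLexicon lexicon_set out) := by unfold Spec_extractCompundsInLexicon; infer_instance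

-- ===== CLAIM (what is proved, stated in full; the proofs are below) =====
def Claim_equal_extractCompundsInLexicon : Prop := ∀ (lexicon_set : List String), Dom_extractCompundsInLexicon lexicon_set → Spec_extractCompundsInLexicon lexicon_set (extractCompundsInLexicon lexicon_set)

-- ===== LEMMAS AND PROOFS =====

-- trie membership (proof-side characterisation of the trie's contents)
def pvTmem : PTrie → List Char → Bool
  | _, [] => false
  | t, c :: cs =>
    match PTrie.findSib t c with
    | none => false
    | some (tm, ch) => if cs.isEmpty then tm else pvTmem ch cs

theorem pvTmem_nil (s : List Char) : pvTmem .nil s = false := by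
  cases s <;> simp [pvTmem, PTrie.findSib]

theorem pvTmem_node_ne (a c' : Char) (tm : Bool) (ch nx : PTrie) (ss : List Char)
    (hac : a ≠ c') : pvTmem (.node c' tm ch nx) (a :: ss) = pvTmem nx (a :: ss) := by
  simp [pvTmem, PTrie.findSib, hac]

theorem pvTmem_insert (t : PTrie) (w s : List Char) (hs : s ≠ []) :
    pvTmem (PTrie.insert t w) s = (decide (s = w) || pvTmem t s) := by
  fun_induction PTrie.insert t w generalizing s with
  | case1 t => obtain ⟨a, ss, rfl⟩ := List.ne_nil_iff_exists_cons.mp hs; simp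
  | case2 c cs ih =>
    obtain ⟨a, ss, rfl⟩ := List.ne_nil_iff_exists_cons.mp hs
    by_cases hac : a = c
    · subst hac
      cases hss : ss.isEmpty
      · have := ih ss (by simpa using hss)
        simp [pvTmem, PTrie.findSib, hss, this, pvTmem_nil]
      · simp_all [pvTmem, PTrie.findSib, pvTmem_nil, List.isEmpty_iff]
        cases cs <;> simp_all
    · simp [pvTmem, PTrie.findSib, hac]
  | case3 x1 x2 x3 x4 x5 =>
    rename_i h1
    obtain ⟨a, ss, rfl⟩ := List.ne_nil_iff_exists_cons.mp hs
    by_cases hac : a = x4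
    · subst hac
      cases hss : ss.isEmpty
      · have := h1 ss (by simpa using hss)
        simp [pvTmem, PTrie.findSib, hss, this, Bool.or_comm]
      · have : ss = [] := by simpa [List.isEmpty_iff] using hss
        subst this
        cases x5 <;> simp [pvTmem, PTrie.findSib, Bool.or_comm]
    · simp [pvTmem, PTrie.findSib, hac]
  | case4 x1 x2 x3 x4 x5 =>
    rename_i cs hne h1
    obtain ⟨a, ss, rfl⟩ := List.ne_nil_iff_exists_cons.mp hs
    by_cases hac : a = x1
    · subst hac
      have hax : ¬ a = x5 := fun h => hne h.symm
      simp [pvTmem, PTrie.findSib, hax]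
    · rw [pvTmem_node_ne a x1 x2 x3 _ ss hac, pvTmem_node_ne a x1 x2 x3 _ ss hac, h1 (a :: ss) hs]

theorem pvTmem_build (lex : List String) (t0 : PTrie) (s : List Char) (hs : s ≠ []) :
    pvTmem (lex.foldl (fun t w => PTrie.insert t w.toList) t0) s
      = (lex.any (fun w => decide (s = w.toList)) || pvTmem t0 s) := by
  induction lex generalizing t0 with
  | nil => simp
  | cons w ws ih =>
    simp [List.foldl_cons, ih, pvTmem_insert _ _ _ hs, Bool.or_comm, Bool.or_assoc]

theorem pvSliceTake (w : String) (n : Nat) :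
    PySem.Str.slice w none (some (n:Int)) = String.ofList (w.toList.take n) := by
  apply String.toList_inj.mp
  rw [PySem.Str.toList_slice, PySem.Chars.slice_eq_listSlice, PySem.List.slice_to_natCast,
    String.toList_ofList]

theorem pvSliceDrop (w : String) (n : Nat) :
    PySem.Str.slice w (some (n:Int)) none = String.ofList (w.toList.drop n) := by
  apply String.toList_inj.mp
  rw [PySem.Str.toList_slice, PySem.Chars.slice_eq_listSlice, PySem.List.slice_from_natCast,
    String.toList_ofList]

-- A's inner loop, recast as a structural recursion over the split position
def pvAFrom (lex : List String) : List Char → List Char → PySem.Dict String (List String) → PySem.Dict String (List String)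
  | _, [], d => d
  | pre, c :: rs, d =>
    let pre' := pre ++ [c]
    let d' := if !rs.isEmpty && lex.contains (String.ofList pre') && lex.contains (String.ofList rs) then
                d.modify (String.ofList pre') [] (· ++ [String.ofList rs])
              else d
    pvAFrom lex pre' rs d'

theorem pvAFrom_eq_fold (lex : List String) (w : String) :
    ∀ (rest pre : List Char), pre ++ rest = w.toList → ∀ d,
    pvAFrom lex pre rest d =
      (PySem.List.pyRange (pre.length + 1) (PySem.Str.len w) 1).foldl (fun d i =>
        let first := PySem.Str.slice w none (some i)
        let second := PySem.Str.slice w (some i) none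
        if lex.contains first && lex.contains second then
          d.modify first [] (· ++ [second])
        else d) d := by
  intro rest
  induction rest with
  | nil =>
    intro pre hpre d
    have hL : PySem.Str.len w = (pre.length : Int) := by
      simp [pysem, ← hpre]
    rw [hL]
    rw [PySem.List.pyRange_one_eq_nil (a := (pre.length:Int)+1) (b := (pre.length:Int)) (by omega)]
    simp [pvAFrom]
  | cons c rs ih =>
    intro pre hpre d
    have hL : PySem.Str.len w = ((pre.length + 1 + rs.length : Nat) : Int) := by
      simp [pysem, ← hpre]
      ring
    have hcast : ((pre.length : Int) + 1) = ((pre.length + 1 : Nat) : Int) := by push_cast; ring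
    have hfirst : PySem.Str.slice w none (some ((pre.length : Int) + 1)) = String.ofList (pre ++ [c]) := by
      rw [hcast, pvSliceTake, ← hpre]
      congr 1
      rw [List.take_append]
      simp
    have hsecond : PySem.Str.slice w (some ((pre.length : Int) + 1)) none = String.ofList rs := by
      rw [hcast, pvSliceDrop, ← hpre]
      simp
    cases hrs : rs.isEmpty
    · have hne : rs ≠ [] := by simpa [List.isEmpty_iff] using hrs
      have hcons : PySem.List.pyRange ((pre.length : Int) + 1) (PySem.Str.len w) 1
          = ((pre.length : Int) + 1) :: PySem.List.pyRange ((pre.length : Int) + 1 + 1) (PySem.Str.len w) 1 := by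
        rw [hL]
        exact PySem.List.pyRange_one_cons (by
          have : 0 < rs.length := List.length_pos_of_ne_nil hne
          push_cast; omega)
      rw [hcons]
      simp only [List.foldl_cons, hfirst, hsecond]
      have ih' := ih (pre ++ [c]) (by simp [← hpre])
      rw [pvAFrom]
      simp only [hrs, Bool.not_false, Bool.true_and]
      rw [ih' _]
      congr 2
      simp only [List.length_append, List.length_cons, List.length_nil]
      push_cast
      ring
    · have hrs' : rs = [] := by simpa [List.isEmpty_iff] using hrs
      subst hrs'
      rw [pvAFrom, pvAFrom]
      have hb : PySem.Str.len w ≤ (pre.length : Int) + 1 := by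
        rw [hL]
        simp
      have hnil : PySem.List.pyRange ((pre.length : Int) + 1) (PySem.Str.len w) 1 = [] :=
        PySem.List.pyRange_one_eq_nil hb
      rw [hnil]
      simp

theorem pvSetContains (lex : List String) (y : String) :
    (PySem.Set.ofList lex).contains y = lex.contains y := by
  rw [Bool.eq_iff_iff]
  simp [PySem.Set.contains, PySem.Set.mem_ofList]

theorem pvContains_eq (lex : List String) (x : List Char) :
    lex.contains (String.ofList x) = lex.any (fun w => decide (x = w.toList)) := by
  rw [Bool.eq_iff_iff]
  simp [List.any_eq_true]
  constructor
  · intro h; exact ⟨String.ofList x, h, by simp⟩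
  · rintro ⟨w, hw, h⟩
    have : String.ofList x = w := by rw [h, String.ofList_toList]
    exact this ▸ hw

theorem pvWalk_eq_AFrom (lex : List String) (root : PTrie)
    (hroot : ∀ s, s ≠ [] → pvTmem root s = lex.any (fun w => decide (s = w.toList))) :
    ∀ (rest pre : List Char) (cur : PTrie) d,
    (∀ s, s ≠ [] → pvTmem cur s = pvTmem root (pre ++ s)) →
    (rest ≠ [] → pvTmem root (pre ++ rest) = true) →
    pvWalk (PySem.Set.ofList lex) cur pre rest d = pvAFrom lex pre rest d := by
  intro rest
  induction rest with
  | nil => intro pre cur d _ _; rw [pvWalk, pvAFrom]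
  | cons c rs ih =>
    intro pre cur d hcur hrest
    have htrue : pvTmem cur (c :: rs) = true := by
      rw [hcur (c :: rs) (by simp)]; exact hrest (by simp)
    cases hfs : cur.findSib c with
    | none => rw [pvTmem, hfs] at htrue; simp at htrue
    | some p =>
      obtain ⟨tm, ch⟩ := p
      have htm : tm = lex.contains (String.ofList (pre ++ [c])) := by
        have h1 : pvTmem cur [c] = tm := by rw [pvTmem, hfs]; simp
        rw [pvContains_eq, ← hroot (pre ++ [c]) (by simp), ← hcur [c] (by simp), h1]
      rw [pvWalk, hfs]
      simp only []
      rw [pvAFrom]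
      have hcond : (tm && !rs.isEmpty && (PySem.Set.ofList lex).contains (String.ofList rs))
          = (!rs.isEmpty && lex.contains (String.ofList (pre ++ [c])) && lex.contains (String.ofList rs)) := by
        rw [pvSetContains, htm, Bool.and_comm (!rs.isEmpty)]
      rw [hcond]
      apply ih
      · intro s hs
        have : pvTmem ch s = pvTmem cur (c :: s) := by
          rw [pvTmem, hfs]
          simp [List.isEmpty_iff, hs]
        rw [this, hcur (c :: s) (by simp), List.append_assoc]
        rfl
      · intro hrs
        rw [List.append_assoc]
        exact hrest (by simp)

-- ===== VERDICT (by name: the statement is the Claim_ definition above) =====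
theorem extractCompundsInLexicon_spec : Claim_equal_extractCompundsInLexicon := by
  intro lex _
  unfold Spec_extractCompundsInLexicon extractCompundsInLexicon extractCompundsInLexicon_alt
  simp only []
  congr 1
  apply PySem.List.foldl_congr_mem
  intro d w hw
  have hroot : ∀ s, s ≠ [] → pvTmem (lex.foldl (fun t w => PTrie.insert t w.toList) .nil) s
      = lex.any (fun w => decide (s = w.toList)) := by
    intro s hs
    rw [pvTmem_build lex .nil s hs, pvTmem_nil, Bool.or_false]
  have hwalk := pvWalk_eq_AFrom lex (lex.foldl (fun t w => PTrie.insert t w.toList) .nil) hroot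
    w.toList [] (lex.foldl (fun t w => PTrie.insert t w.toList) .nil) d
    (fun s _ => rfl) (fun hne => by
      rw [List.nil_append, hroot w.toList (by simpa using hne)]
      simp [List.any_eq_true]
      exact ⟨w, hw, rfl⟩)
  have hfold := pvAFrom_eq_fold lex w w.toList [] (by simp) d
  rw [hfold] at hwalk
  simp only [List.length_nil, Nat.cast_zero, zero_add] at hwalk
  exact hwalk.symm
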